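-- pv_equiv track=rewrite | github.com/avulman/adversary-detection-as-code-lab | scripts/validate_repo.py | diff_security_onion_repo_vs_state
-- ===== SOURCE A (Python) =====
-- ALLOWED_STATE_ENGINES = {"suricata", "sigma"}
--
-- def normalize_rule_content(content: str) -> str:
--     return " ".join(content.split())
--
-- def diff_security_onion_repo_vs_state(repo_state: dict, saved_state: dict) -> list[dict]:
--     changes = []
--
--     # iterate over each supported engine (Suricata, Sigma)
--     for engine in sorted(ALLOWED_STATE_ENGINES):
--         repo_rules = repo_state.get(engine, {})
--         state_rules = saved_state.get(engine, {})
--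
--         # compute set differences to identify changes
--         repo_names = set(repo_rules.keys())
--         state_names = set(state_rules.keys())
--
--         # new rules in repo > create
--         for name in sorted(repo_names - state_names):
--             changes.append(
--                 {
--                     "engine": engine,
--                     "action": "create",
--                     "name": name,
--                 }
--             )
--
--         # rules removed from repo > delete
--         for name in sorted(state_names - repo_names):
--             changes.append(
--                 {
--                     "engine": engine,
--                     "action": "delete",
--                     "name": name,
--                 }
--             )
--
--         # rules present in both > check for updates
--         for name in sorted(repo_names & state_names):
--             # normalize both sides to ignore whitespace/formatting differences
--             repo_content = normalize_rule_content(repo_rules[name])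
--             state_content = normalize_rule_content(state_rules[name])
--             # if content differs, mark as update
--             if repo_content != state_content:
--                 changes.append(
--                     {
--                         "engine": engine,
--                         "action": "update",
--                         "name": name,
--                     }
--                 )
--
--     return changes
-- ===== SOURCE B (Python) =====
-- ALLOWED_STATE_ENGINES = {"suricata", "sigma"}
--
-- def normalize_rule_content(content: str) -> str:
--     return " ".join(content.split())
--
-- def diff_security_onion_repo_vs_state(repo_state: dict, saved_state: dict) -> list[dict]:
--     changes = []
--     for engine in sorted(ALLOWED_STATE_ENGINES):
--         repo_rules = repo_state.get(engine, {})
--         state_rules = saved_state.get(engine, {})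
--         creates, deletes, updates = [], [], []
--         # one pass over the sorted union of names, classifying each into a bucket
--         for name in sorted(set(repo_rules) | set(state_rules)):
--             if name not in state_rules:
--                 creates.append({"engine": engine, "action": "create", "name": name})
--             elif name not in repo_rules:
--                 deletes.append({"engine": engine, "action": "delete", "name": name})
--             elif normalize_rule_content(repo_rules[name]) != normalize_rule_content(state_rules[name]):
--                 updates.append({"engine": engine, "action": "update", "name": name})
--         changes += creates + deletes + updates
--     return changes
-- ===== Notes on version B (the rewrite author's own statement) =====
-- stated objective: alternative
-- what changed: Replaces A's three per-engine passes over three separately computed set differences by a single classifying pass over the sorted union of rule names, bucketing each name into creates/deletes/updates and flushing the buckets in A's order.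
import Mathlib
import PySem

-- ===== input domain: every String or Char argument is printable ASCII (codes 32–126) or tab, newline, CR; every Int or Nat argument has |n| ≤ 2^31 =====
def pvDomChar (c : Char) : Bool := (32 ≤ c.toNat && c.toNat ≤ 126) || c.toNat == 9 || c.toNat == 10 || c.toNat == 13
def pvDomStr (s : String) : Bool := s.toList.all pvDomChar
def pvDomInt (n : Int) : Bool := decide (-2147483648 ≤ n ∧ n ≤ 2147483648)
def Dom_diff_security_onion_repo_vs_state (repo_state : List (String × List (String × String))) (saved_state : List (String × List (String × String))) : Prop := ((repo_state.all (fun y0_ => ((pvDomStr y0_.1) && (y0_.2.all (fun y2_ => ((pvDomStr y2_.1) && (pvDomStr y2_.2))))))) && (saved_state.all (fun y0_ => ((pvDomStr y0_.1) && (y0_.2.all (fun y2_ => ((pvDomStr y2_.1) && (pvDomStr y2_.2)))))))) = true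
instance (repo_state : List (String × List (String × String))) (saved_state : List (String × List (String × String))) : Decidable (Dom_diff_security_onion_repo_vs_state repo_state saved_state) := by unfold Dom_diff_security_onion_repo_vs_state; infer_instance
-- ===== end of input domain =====

-- ===== PORT A =====
-- B replaces A's three per-engine set-difference passes by one classifying pass over the
-- sorted union of rule names (alternative decomposition, same cost); return values only.

-- normalize_rule_content
def pvNormalize (content : String) : String :=
  PySem.Str.join " " (PySem.Str.split₀ content)

-- sorted(ALLOWED_STATE_ENGINES)
def pvEngines : List String :=
  PySem.List.sorted (PySem.Set.ofList ["suricata", "sigma"]) (fun x => x)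

-- A's loop body for one engine (the helper holds the body of `for engine in …`)
def pvStepA (repo_state saved_state : List (String × List (String × String)))
    (changes : List (List (String × String))) (engine : String) : List (List (String × String)) :=
  let repo_rules := (PySem.Dict.mk repo_state).getD engine []
  let state_rules := (PySem.Dict.mk saved_state).getD engine []
  let repo_names : PySem.Set String := PySem.Set.ofList (repo_rules.map Prod.fst)
  let state_names : PySem.Set String := PySem.Set.ofList (state_rules.map Prod.fst)
  let changes := (PySem.List.sorted (repo_names.diff state_names) (fun x => x)).foldl
    (fun acc name => acc ++ [[("engine", engine), ("action", "create"), ("name", name)]]) changes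
  let changes := (PySem.List.sorted (state_names.diff repo_names) (fun x => x)).foldl
    (fun acc name => acc ++ [[("engine", engine), ("action", "delete"), ("name", name)]]) changes
  -- repo_rules[name] / state_rules[name]: name is in both dicts here, so getD "" is exact (KeyError unreachable)
  (PySem.List.sorted (repo_names.inter state_names) (fun x => x)).foldl
    (fun acc name =>
      if pvNormalize ((PySem.Dict.mk repo_rules).getD name "")
           != pvNormalize ((PySem.Dict.mk state_rules).getD name "") then
        acc ++ [[("engine", engine), ("action", "update"), ("name", name)]]
      else acc) changes

def diff_security_onion_repo_vs_state (repo_state : List (String × List (String × String))) (saved_state : List (String × List (String × String))) : List (List (String × String)) :=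
  pvEngines.foldl (pvStepA repo_state saved_state) []

-- ===== PORT B =====
-- B's loop body for one engine: one pass over sorted(set(repo_rules) | set(state_rules))
-- classifying each name into creates/deletes/updates, then flush the three buckets
def pvStepB (repo_state saved_state : List (String × List (String × String)))
    (changes : List (List (String × String))) (engine : String) : List (List (String × String)) :=
  let repo_rules := (PySem.Dict.mk repo_state).getD engine []
  let state_rules := (PySem.Dict.mk saved_state).getD engine []
  let buckets :=
    (PySem.List.sorted ((PySem.Set.ofList (repo_rules.map Prod.fst)).union (state_rules.map Prod.fst)) (fun x => x)).foldl
      (fun (acc : List (List (String × String)) × List (List (String × String)) × List (List (String × String))) name =>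
        if !(PySem.Dict.mk state_rules).contains name then
          (acc.1 ++ [[("engine", engine), ("action", "create"), ("name", name)]], acc.2.1, acc.2.2)
        else if !(PySem.Dict.mk repo_rules).contains name then
          (acc.1, acc.2.1 ++ [[("engine", engine), ("action", "delete"), ("name", name)]], acc.2.2)
        else if pvNormalize ((PySem.Dict.mk repo_rules).getD name "")
                  != pvNormalize ((PySem.Dict.mk state_rules).getD name "") then
          (acc.1, acc.2.1, acc.2.2 ++ [[("engine", engine), ("action", "update"), ("name", name)]])
        else acc)
      ([], [], [])
  changes ++ buckets.1 ++ buckets.2.1 ++ buckets.2.2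

def diff_security_onion_repo_vs_state_alt (repo_state : List (String × List (String × String))) (saved_state : List (String × List (String × String))) : List (List (String × String)) :=
  pvEngines.foldl (pvStepB repo_state saved_state) []

-- ===== PRECONDITION & SPEC =====
def Spec_diff_security_onion_repo_vs_state (repo_state : List (String × List (String × String))) (saved_state : List (String × List (String × String))) (out : List (List (String × String))) : Prop := out = diff_security_onion_repo_vs_state_alt repo_state saved_state
instance (repo_state : List (String × List (String × String))) (saved_state : List (String × List (String × String))) (out : List (List (String × String))) : Decidable (Spec_diff_security_onion_repo_vs_state repo_state saved_state out) := by unfold Spec_diff_security_onion_repo_vs_state; infer_instance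

-- ===== CLAIM (what is proved, stated in full; the proofs are below) =====
def Claim_equal_diff_security_onion_repo_vs_state : Prop := ∀ (repo_state : List (String × List (String × String))) (saved_state : List (String × List (String × String))), Dom_diff_security_onion_repo_vs_state repo_state saved_state → Spec_diff_security_onion_repo_vs_state repo_state saved_state (diff_security_onion_repo_vs_state repo_state saved_state)

-- ===== LEMMAS AND PROOFS =====

-- a dict literal contains a key iff the key occurs among the pairs' first components
theorem pvContainsEq (ps : List (String × String)) (k : String) :
    (PySem.Dict.mk ps).contains k = decide (k ∈ ps.map Prod.fst) := by
  have hiff : (PySem.Dict.mk ps).contains k = true ↔ k ∈ ps.map Prod.fst := by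
    simp [PySem.Dict.contains_mk, List.any_eq_true, List.mem_map]
  by_cases h : k ∈ ps.map Prod.fst
  · rw [decide_eq_true h]; exact hiff.2 h
  · rw [decide_eq_false h]; exact Bool.eq_false_iff.2 (fun hc => h (hiff.1 hc))

-- B's classifying fold computes the three filtered buckets
theorem pvClassifyFoldl {A B : Type} (p q r : A → Bool) (f g h : A → B)
    (L : List A) (c d u : List B) :
    L.foldl (fun acc x =>
      if p x then (acc.1 ++ [f x], acc.2.1, acc.2.2)
      else if q x then (acc.1, acc.2.1 ++ [g x], acc.2.2)
      else if r x then (acc.1, acc.2.1, acc.2.2 ++ [h x])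
      else acc) (c, d, u)
    = (c ++ (L.filter p).map f,
       d ++ (L.filter (fun x => !p x && q x)).map g,
       u ++ (L.filter (fun x => !p x && !q x && r x)).map h) := by
  induction L generalizing c d u with
  | nil => simp
  | cons a t ih =>
    by_cases hp : p a
    · simp [hp, ih]
    · by_cases hq : q a
      · simp [hp, hq, ih]
      · by_cases hr : r a
        · simp [hp, hq, hr, ih]
        · simp [hp, hq, hr, ih]

-- filtering the sorted union of names by a predicate is sorting the set the predicate names
theorem pvFilterSortedUnion (xs ys : List String) (p : String → Bool) (zs : PySem.Set String)
    (hnd : zs.Nodup)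
    (hmem : ∀ a, a ∈ zs ↔ (a ∈ xs ∨ a ∈ ys) ∧ p a = true) :
    (PySem.List.sorted ((PySem.Set.ofList xs).union ys) (fun x => x)).filter p
      = PySem.List.sorted zs (fun x => x) := by
  have hU : (PySem.Set.ofList xs).union ys = PySem.Set.ofList (xs ++ ys) := by
    rw [PySem.Set.ofList_append]; rfl
  rw [hU]
  have hpw : ((PySem.List.sorted (PySem.Set.ofList (xs ++ ys)) (fun x => x)).filter p).Pairwise
      (fun a b => a < b) := (PySem.List.sorted_ofList_pairwise_lt (xs ++ ys)).filter p
  have hnd2 : ((PySem.List.sorted (PySem.Set.ofList (xs ++ ys)) (fun x => x)).filter p).Nodup :=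
    (((PySem.List.sorted_perm _ _ _).nodup_iff).2 (PySem.Set.nodup_ofList _)).filter p
  refine (PySem.List.sorted_eq_of_perm_of_pairwise_lt _ _ _ ?_ hpw).symm
  rw [List.perm_ext_iff_of_nodup hnd2 hnd]
  intro a
  rw [List.mem_filter, PySem.List.mem_sorted, PySem.Set.mem_ofList, List.mem_append, hmem]

-- per-engine: A's three passes equal B's classified single pass
theorem pvStepEq (repo_state saved_state : List (String × List (String × String)))
    (changes : List (List (String × String))) (engine : String) :
    pvStepA repo_state saved_state changes engine = pvStepB repo_state saved_state changes engine := by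
  simp only [pvStepA, pvStepB]
  rw [pvClassifyFoldl]
  rw [PySem.List.foldl_append_singleton_eq_map, PySem.List.foldl_append_singleton_eq_map,
      PySem.List.foldl_append_if]
  set rr := (PySem.Dict.mk repo_state).getD engine [] with hrr
  set sr := (PySem.Dict.mk saved_state).getD engine [] with hsr
  have hC : (PySem.List.sorted ((PySem.Set.ofList (rr.map Prod.fst)).union (sr.map Prod.fst)) (fun x => x)).filter
        (fun name => !(PySem.Dict.mk sr).contains name)
      = PySem.List.sorted ((PySem.Set.ofList (rr.map Prod.fst)).diff (PySem.Set.ofList (sr.map Prod.fst))) (fun x => x) := by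
    apply pvFilterSortedUnion
    · exact PySem.Set.nodup_diff _ _ (PySem.Set.nodup_ofList _)
    · intro a
      simp only [pvContainsEq, PySem.Set.mem_diff, PySem.Set.mem_ofList, Bool.not_eq_true',
        decide_eq_false_iff_not]
      tauto
  have hD : (PySem.List.sorted ((PySem.Set.ofList (rr.map Prod.fst)).union (sr.map Prod.fst)) (fun x => x)).filter
        (fun name => !(!(PySem.Dict.mk sr).contains name) && !(PySem.Dict.mk rr).contains name)
      = PySem.List.sorted ((PySem.Set.ofList (sr.map Prod.fst)).diff (PySem.Set.ofList (rr.map Prod.fst))) (fun x => x) := by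
    apply pvFilterSortedUnion
    · exact PySem.Set.nodup_diff _ _ (PySem.Set.nodup_ofList _)
    · intro a
      simp only [pvContainsEq, PySem.Set.mem_diff, PySem.Set.mem_ofList, Bool.not_not,
        Bool.and_eq_true, Bool.not_eq_true', decide_eq_true_eq, decide_eq_false_iff_not]
      tauto
  have hI : (PySem.List.sorted ((PySem.Set.ofList (rr.map Prod.fst)).union (sr.map Prod.fst)) (fun x => x)).filter
        (fun name => !(!(PySem.Dict.mk sr).contains name) && !(!(PySem.Dict.mk rr).contains name))
      = PySem.List.sorted ((PySem.Set.ofList (rr.map Prod.fst)).inter (PySem.Set.ofList (sr.map Prod.fst))) (fun x => x) := by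
    apply pvFilterSortedUnion
    · exact PySem.Set.nodup_inter _ _ (PySem.Set.nodup_ofList _)
    · intro a
      simp only [pvContainsEq, PySem.Set.mem_inter, PySem.Set.mem_ofList, Bool.not_not,
        Bool.and_eq_true, decide_eq_true_eq]
      tauto
  -- rewrite B's update bucket: reassociate the filter
  have hU : ∀ (rcond : String → Bool) (L : List String),
      L.filter (fun x => !(!(PySem.Dict.mk sr).contains x) && !(!(PySem.Dict.mk rr).contains x) && rcond x)
        = (L.filter (fun x => !(!(PySem.Dict.mk sr).contains x) && !(!(PySem.Dict.mk rr).contains x))).filter rcond := by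
    intro rcond L
    rw [List.filter_filter]
    apply List.filter_congr
    intro a _
    cases hs : (PySem.Dict.mk sr).contains a <;> cases hr2 : (PySem.Dict.mk rr).contains a <;>
      cases hrc : rcond a <;> simp
  rw [hC, hD, hU, hI]
  simp [List.append_assoc]

-- ===== VERDICT (by name: the statement is the Claim_ definition above) =====
theorem diff_security_onion_repo_vs_state_spec : Claim_equal_diff_security_onion_repo_vs_state := by
  intro rs ss _
  unfold Spec_diff_security_onion_repo_vs_state diff_security_onion_repo_vs_state diff_security_onion_repo_vs_state_alt
  have hf : pvStepA rs ss = pvStepB rs ss := by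
    funext changes engine; exact pvStepEq rs ss changes engine
  rw [hf]
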